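-- pv_equiv track=rewrite | github.com/KarimKammoun/HackerRank | Easy/Beautiful_Triplets.py | beautifulTriplets
-- ===== SOURCE A (Python) =====
-- def beautifulTriplets(d, arr):
--     # Write your code here
--     res=0
--     dic={}
--     liste=[]
--     for i in range(len(arr)):
--         if not(arr[i] in dic):
--             dic[arr[i]]=1
--             liste.append(arr[i])
--         else:
--
--             dic[arr[i]]+=1
--     for i in range(len(liste)):
--         s=1
--         s=s*dic[liste[i]]
--         if (liste[i]+d) in dic  and  (liste[i]+d+d)in dic:
--             s=s*dic[liste[i]+d]
--             s=s*dic[liste[i]+d+d]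
--             res=res+s
--
--     return(res)
-- ===== SOURCE B (Python) =====
-- def _runs(s):
--     # run-length encode a sorted list into (value, multiplicity) pairs
--     runs = []
--     i = 0
--     n = len(s)
--     while i < n:
--         j = i + 1
--         while j < n and s[j] == s[i]:
--             j += 1
--         runs.append((s[i], j - i))
--         i = j
--     return runs
--
--
-- def _lookup(runs, v, lo, hi):
--     # binary search for value v among the strictly increasing run values; 0 if absent
--     if lo >= hi:
--         return 0
--     mid = (lo + hi) // 2
--     if runs[mid][0] == v:
--         return runs[mid][1]
--     if runs[mid][0] < v:
--         return _lookup(runs, v, mid + 1, hi)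
--     return _lookup(runs, v, lo, mid)
--
--
-- def beautifulTriplets(d, arr):
--     runs = _runs(sorted(arr))
--     n = len(runs)
--     res = 0
--     for v, c in runs:
--         res += c * _lookup(runs, v + d, 0, n) * _lookup(runs, v + 2 * d, 0, n)
--     return res
-- ===== Notes on version B (the rewrite author's own statement) =====
-- stated objective: alternative
-- what changed: B uses no dictionary at all: it sorts the array, run-length encodes it into (value, multiplicity) pairs, and finds the multiplicities of x+d and x+2d by binary search over the strictly increasing run values, instead of A's hash-map counting with a parallel dedup list.
import Mathlib
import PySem

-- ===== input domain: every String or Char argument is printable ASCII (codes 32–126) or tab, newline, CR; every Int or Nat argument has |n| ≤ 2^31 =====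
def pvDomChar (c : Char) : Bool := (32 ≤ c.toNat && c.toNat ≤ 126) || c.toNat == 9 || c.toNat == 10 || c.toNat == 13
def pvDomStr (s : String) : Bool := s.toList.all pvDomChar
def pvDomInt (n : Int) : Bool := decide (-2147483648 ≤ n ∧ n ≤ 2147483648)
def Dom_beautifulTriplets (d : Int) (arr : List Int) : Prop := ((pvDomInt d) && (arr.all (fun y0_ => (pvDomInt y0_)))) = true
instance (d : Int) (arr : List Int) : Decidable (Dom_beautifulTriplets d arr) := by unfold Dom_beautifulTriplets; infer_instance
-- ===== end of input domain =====

-- B uses no dictionary: it sorts the array, run-length encodes it into (value, multiplicity)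
-- pairs, and binary-searches the strictly increasing run values for x+d and x+2d.

-- ===== PORT A =====
def beautifulTriplets (d : Int) (arr : List Int) : Int :=
  let res : Int := 0
  let st := (PySem.List.pyRange 0 (arr.length : Int) 1).foldl
    (fun (st : PySem.Dict Int Int × List Int) i =>
      let x := PySem.List.pyGetD arr i 0
      if !(st.1.contains x) then (st.1.insert x 1, st.2 ++ [x])
      else (st.1.modify x 0 (· + 1), st.2))
    (PySem.Dict.empty, [])
  let dic := st.1
  let liste := st.2
  (PySem.List.pyRange 0 (liste.length : Int) 1).foldl
    (fun res i =>
      let x := PySem.List.pyGetD liste i 0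
      let s : Int := 1
      let s := s * dic.getD x 0
      if dic.contains (x + d) && dic.contains (x + d + d) then
        res + s * dic.getD (x + d) 0 * dic.getD (x + d + d) 0
      else res)
    res

-- ===== PORT B =====
-- _runs(s): the outer while-loop over the start index i; the inner while-loop counting the
-- equal block is the length of the matching prefix of s[i+1:]; the appended count is j - i.
def pvRunsFrom (s : List Int) (i : Nat) : List (Int × Int) :=
  if h : i < s.length then
    (s[i], (1 + (((s.drop (i + 1)).takeWhile (fun y => y == s[i])).length : Int))) ::
      pvRunsFrom s (i + 1 + ((s.drop (i + 1)).takeWhile (fun y => y == s[i])).length)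
  else []
termination_by s.length - i
decreasing_by omega

-- _lookup(runs, v, lo, hi): recursive binary search; runs[mid] is exact here since every
-- reachable call has mid < runs.length (getD's default is never used on those).
def pvLookup (runs : List (Int × Int)) (v : Int) (lo hi : Nat) : Int :=
  if _h : lo < hi then
    let p := runs.getD ((lo + hi) / 2) (0, 0)
    if p.1 == v then p.2
    else if p.1 < v then pvLookup runs v ((lo + hi) / 2 + 1) hi
    else pvLookup runs v lo ((lo + hi) / 2)
  else 0
termination_by hi - lo
decreasing_by all_goals omega

def beautifulTriplets_alt (d : Int) (arr : List Int) : Int :=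
  let runs := pvRunsFrom (PySem.List.sorted arr (fun x => x) false) 0
  runs.foldl
    (fun res p =>
      res + p.2 * pvLookup runs (p.1 + d) 0 runs.length * pvLookup runs (p.1 + 2 * d) 0 runs.length)
    0

-- ===== PRECONDITION & SPEC =====
def Spec_beautifulTriplets (d : Int) (arr : List Int) (out : Int) : Prop := out = beautifulTriplets_alt d arr
instance (d : Int) (arr : List Int) (out : Int) : Decidable (Spec_beautifulTriplets d arr out) := by unfold Spec_beautifulTriplets; infer_instance

-- ===== CLAIM (what is proved, stated in full; the proofs are below) =====
def Claim_equal_beautifulTriplets : Prop := ∀ (d : Int) (arr : List Int), Dom_beautifulTriplets d arr → Spec_beautifulTriplets d arr (beautifulTriplets d arr)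

-- ===== LEMMAS AND PROOFS =====

-- recursive reformulation of _runs, used only in the proofs
def runsRec : List Int → List (Int × Int)
  | [] => []
  | v :: t =>
      (v, 1 + ((t.takeWhile (fun y => y == v)).length : Int)) ::
        runsRec (t.dropWhile (fun y => y == v))
termination_by l => l.length
decreasing_by
  simpa using Nat.lt_succ_of_le (List.length_dropWhile_le _ _)

lemma dropWhile_eq_drop (t : List Int) (p : Int → Bool) :
    t.dropWhile p = t.drop (t.takeWhile p).length := by
  induction t with
  | nil => rfl
  | cons a t ih =>
    by_cases h : p a
    · simp [h, ih]
    · simp [h]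

lemma runsFrom_eq (s : List Int) (i : Nat) : pvRunsFrom s i = runsRec (s.drop i) := by
  rw [pvRunsFrom]
  split
  · rename_i h
    rw [List.drop_eq_getElem_cons h, runsRec]
    congr 1
    rw [runsFrom_eq s (i + 1 + ((s.drop (i + 1)).takeWhile (fun y => y == s[i])).length)]
    rw [dropWhile_eq_drop, ← List.drop_drop]
  · rename_i h
    rw [List.drop_eq_nil_of_le (by omega), runsRec]
termination_by s.length - i
decreasing_by omega

-- A-side lemmas (counter loop)
lemma insert_one_eq_modify (dc : PySem.Dict Int Int) (x : Int) (h : dc.contains x = false) :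
    dc.insert x 1 = dc.modify x 0 (· + 1) := by
  simp [PySem.Dict.insert, PySem.Dict.modify, h, PySem.Dict.getD_of_not_contains _ _ h]

lemma loopA (l : List Int) : ∀ (dc : PySem.Dict Int Int) (ls : List Int),
    (∀ x, dc.contains x = ls.contains x) →
    l.foldl (fun (st : PySem.Dict Int Int × List Int) x =>
        if !(st.1.contains x) then (st.1.insert x 1, st.2 ++ [x])
        else (st.1.modify x 0 (· + 1), st.2)) (dc, ls)
      = (l.foldl (fun d x => d.modify x 0 (· + 1)) dc, l.foldl PySem.Set.add ls) := by
  induction l with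
  | nil => intro dc ls _; rfl
  | cons a l ih =>
    intro dc ls hinv
    by_cases hc : dc.contains a = true
    · have hls : ls.contains a = true := by rw [← hinv]; exact hc
      have hmem : a ∈ ls := by simpa using hls
      simp only [List.foldl_cons, hc, Bool.not_true, if_neg Bool.false_ne_true]
      rw [show PySem.Set.add ls a = ls by simp [PySem.Set.add, hmem]]
      exact ih _ _ (fun x => by
        rw [PySem.Dict.contains_modify, hinv]
        by_cases hxa : x = a
        · subst hxa; simp; simpa using hls
        · simp [hxa])
    · have hc' : dc.contains a = false := by simpa using hc
      have hls : ls.contains a = false := by rw [← hinv]; exact hc'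
      have hmem : a ∉ ls := by simpa using hls
      simp only [List.foldl_cons, hc', Bool.not_false]
      rw [show PySem.Set.add ls a = ls ++ [a] by simp [PySem.Set.add, hmem],
          insert_one_eq_modify dc a hc']
      exact ih _ _ (fun x => by
        rw [PySem.Dict.contains_modify, hinv]
        by_cases hxa : x = a
        · subst hxa; simp
        · simp [hxa])

lemma term_eq (arr : List Int) (d x : Int) :
    (if arr.contains (x + d) && arr.contains (x + d + d) then
        (0 : Int) + 1 * (arr.count x : Int) * (arr.count (x + d) : Int) * (arr.count (x + d + d) : Int)
      else 0)
    = (arr.count x : Int) * ((arr.count (x + d) : Int) * (arr.count (x + d + d) : Int)) := by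
  by_cases h1 : (x + d) ∈ arr
  · by_cases h2 : (x + d + d) ∈ arr
    · simp only [List.contains_eq_mem, h1, h2]; ring_nf; simp
    · simp [List.contains_eq_mem, h2, List.count_eq_zero_of_not_mem h2]
  · simp [List.contains_eq_mem, h1, List.count_eq_zero_of_not_mem h1]

-- B-side lemmas
lemma gt_dropWhile (v : Int) (t : List Int) (hpt : t.Pairwise (· ≤ ·))
    (hall : ∀ y ∈ t, v ≤ y) :
    ∀ y ∈ t.dropWhile (fun y => y == v), v < y := by
  induction t with
  | nil => simp
  | cons a t ih =>
    intro y hy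
    rcases List.pairwise_cons.mp hpt with ⟨hat, hpt'⟩
    by_cases h : a = v
    · rw [List.dropWhile_cons] at hy
      simp only [h] at hy
      simp only [beq_self_eq_true, if_pos] at hy
      exact ih hpt' (fun y hy' => hall y (List.mem_cons_of_mem _ hy')) y hy
    · have hva : v < a :=
        lt_of_le_of_ne (hall a List.mem_cons_self) (fun hh => h hh.symm)
      rw [List.dropWhile_cons] at hy
      simp only [beq_iff_eq, h, if_false] at hy
      rcases List.mem_cons.mp hy with rfl | hy'
      · exact hva
      · exact lt_of_lt_of_le hva (hat y hy')

lemma runsRec_canon (s : List Int) (hs : s.Pairwise (· ≤ ·)) :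
    ((runsRec s).map Prod.fst).Pairwise (· < ·) ∧
    (∀ v, v ∈ (runsRec s).map Prod.fst ↔ v ∈ s) ∧
    (∀ p ∈ runsRec s, p.2 = (s.count p.1 : Int)) := by
  induction s using runsRec.induct with
  | case1 => simp [runsRec]
  | case2 v t ih =>
    rcases List.pairwise_cons.mp hs with ⟨hvt, hpt⟩
    have ht2pw : (t.dropWhile (fun y => y == v)).Pairwise (· ≤ ·) :=
      hpt.sublist (List.dropWhile_sublist _)
    have hgt := gt_dropWhile v t hpt hvt
    have hmemt1 : ∀ y ∈ t.takeWhile (fun y => y == v), y = v := by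
      intro y hy
      simpa using List.mem_takeWhile_imp hy
    have ht12 : t.takeWhile (fun y => y == v) ++ t.dropWhile (fun y => y == v) = t :=
      List.takeWhile_append_dropWhile
    rcases ih ht2pw with ⟨ih1, ih2, ih3⟩
    have hmem2 : ∀ u, u ∈ (runsRec (t.dropWhile (fun y => y == v))).map Prod.fst → v < u := by
      intro u hu
      exact hgt u ((ih2 u).mp hu)
    refine ⟨?_, ?_, ?_⟩
    · rw [runsRec]
      simp only [List.map_cons]
      exact List.pairwise_cons.mpr ⟨hmem2, ih1⟩
    · intro v'
      rw [runsRec]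
      simp only [List.map_cons, List.mem_cons, ih2 v']
      constructor
      · rintro (rfl | h)
        · exact Or.inl rfl
        · exact Or.inr (List.Sublist.mem h (List.dropWhile_sublist _))
      · rintro (rfl | h)
        · exact Or.inl rfl
        · rw [← ht12] at h
          rcases List.mem_append.mp h with h1 | h2
          · exact Or.inl (hmemt1 _ h1)
          · exact Or.inr h2
    · intro p hp
      rw [runsRec] at hp
      have hcnt1 : (t.takeWhile (fun y => y == v)).count v
          = (t.takeWhile (fun y => y == v)).length := by
        rw [List.count_eq_length]
        intro b hb
        simp [hmemt1 b hb]
      have hsplit : ∀ x : Int, t.count x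
          = (t.takeWhile (fun y => y == v)).count x + (t.dropWhile (fun y => y == v)).count x := by
        intro x
        conv_lhs => rw [← ht12]
        rw [List.count_append]
      rcases List.mem_cons.mp hp with rfl | hp'
      · simp only []
        have hcnt2 : (t.dropWhile (fun y => y == v)).count v = 0 := by
          rw [List.count_eq_zero]
          intro hmem
          exact absurd rfl (ne_of_gt (hgt v hmem))
        rw [List.count_cons_self, hsplit v, hcnt1, hcnt2]
        push_cast
        ring
      · have hp1 : p.1 ∈ (runsRec (t.dropWhile (fun y => y == v))).map Prod.fst :=
          List.mem_map_of_mem hp'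
        have hvp : v < p.1 := hmem2 _ hp1
        have hne : p.1 ≠ v := ne_of_gt hvp
        rw [ih3 p hp']
        congr 1
        have htk0 : (t.takeWhile (fun y => y == v)).count p.1 = 0 := by
          rw [List.count_eq_zero]
          intro hmem
          exact hne (hmemt1 _ hmem)
        have hcc : List.count p.1 (v :: t) = List.count p.1 t := by
          simp [Ne.symm hne]
        rw [hcc, hsplit p.1, htk0]
        omega

lemma lookup_canon (U : List Int) (g : Int → Int) (hU : U.Pairwise (· < ·)) (v : Int) :
    ∀ lo hi, hi ≤ U.length →
    pvLookup (U.map (fun u => (u, g u))) v lo hi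
      = if (∃ k, k < hi ∧ lo ≤ k ∧ U.getD k 0 = v) then g v else 0 := by
  intro lo hi hhi
  rw [pvLookup]
  split
  · rename_i hlt
    have hmlt : (lo + hi) / 2 < U.length := by omega
    have hget : (U.map (fun u => (u, g u))).getD ((lo + hi) / 2) (0, 0)
        = (U[(lo + hi) / 2], g U[(lo + hi) / 2]) := by
      simp [List.getD_eq_getElem?_getD, List.getElem?_eq_getElem hmlt]
    have hgetD : ∀ (k : Nat) (hk : k < U.length), U.getD k 0 = U[k]'hk := by
      intro k hk
      simp [List.getD_eq_getElem?_getD, List.getElem?_eq_getElem hk]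
    have hmono : ∀ i j (h1 : i < U.length) (h2 : j < U.length), i < j → U[i] < U[j] :=
      fun i j h1 h2 hij => List.pairwise_iff_getElem.mp hU i j h1 h2 hij
    rw [hget]
    by_cases he : U[(lo + hi) / 2] = v
    · simp only [he, beq_self_eq_true, if_true]
      rw [if_pos ⟨(lo + hi) / 2, by omega, by omega, by rw [hgetD _ hmlt]; exact he⟩]
    · simp only [beq_iff_eq, he, if_false]
      by_cases hlt2 : U[(lo + hi) / 2] < v
      · rw [if_pos hlt2, lookup_canon U g hU v ((lo + hi) / 2 + 1) hi hhi]
        have hiff : (∃ k, k < hi ∧ (lo + hi) / 2 + 1 ≤ k ∧ U.getD k 0 = v)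
            ↔ (∃ k, k < hi ∧ lo ≤ k ∧ U.getD k 0 = v) := by
          constructor
          · rintro ⟨k, h1, h2, h3⟩
            exact ⟨k, h1, by omega, h3⟩
          · rintro ⟨k, h1, h2, h3⟩
            refine ⟨k, h1, ?_, h3⟩
            by_contra hk
            have hkm : k ≤ (lo + hi) / 2 := by omega
            have hkl : k < U.length := by omega
            rw [hgetD k hkl] at h3
            rcases Nat.lt_or_ge k ((lo + hi) / 2) with hcase | hcase
            · have hlt3 := hmono k ((lo + hi) / 2) hkl hmlt hcase
              rw [h3] at hlt3
              exact absurd (lt_trans hlt3 hlt2) (lt_irrefl v)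
            · have : k = (lo + hi) / 2 := by omega
              subst this
              exact he h3
        rw [if_congr hiff rfl rfl]
      · have hgt2 : v < U[(lo + hi) / 2] :=
          lt_of_le_of_ne (not_lt.mp hlt2) (fun hh => he hh.symm)
        rw [if_neg hlt2, lookup_canon U g hU v lo ((lo + hi) / 2) (by omega)]
        have hiff : (∃ k, k < (lo + hi) / 2 ∧ lo ≤ k ∧ U.getD k 0 = v)
            ↔ (∃ k, k < hi ∧ lo ≤ k ∧ U.getD k 0 = v) := by
          constructor
          · rintro ⟨k, h1, h2, h3⟩
            exact ⟨k, by omega, h2, h3⟩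
          · rintro ⟨k, h1, h2, h3⟩
            refine ⟨k, ?_, h2, h3⟩
            by_contra hk
            have hkl : k < U.length := by omega
            rw [hgetD k hkl] at h3
            rcases Nat.lt_or_ge ((lo + hi) / 2) k with hcase | hcase
            · have hlt3 := hmono ((lo + hi) / 2) k hmlt hkl hcase
              rw [h3] at hlt3
              exact absurd (lt_trans hgt2 hlt3) (lt_irrefl v)
            · have : k = (lo + hi) / 2 := by omega
              subst this
              exact he h3
        rw [if_congr hiff rfl rfl]
  · rename_i h
    rw [if_neg]
    rintro ⟨k, h1, h2, _⟩
    omega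
termination_by lo hi _ => hi - lo
decreasing_by all_goals omega

lemma runs_shape (rs : List (Int × Int)) (g : Int → Int) (h : ∀ p ∈ rs, p.2 = g p.1) :
    rs = (rs.map Prod.fst).map (fun v => (v, g v)) := by
  rw [List.map_map]
  symm
  calc rs.map ((fun v => (v, g v)) ∘ Prod.fst)
      = rs.map id := List.map_congr_left (fun p hp => by
        simp only [Function.comp, id, ← h p hp])
    _ = rs := List.map_id rs

lemma exists_getD_iff (U : List Int) (x : Int) :
    (∃ k, k < U.length ∧ 0 ≤ k ∧ U.getD k 0 = x) ↔ x ∈ U := by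
  constructor
  · rintro ⟨k, hk, -, h3⟩
    rw [List.getD_eq_getElem?_getD, List.getElem?_eq_getElem hk] at h3
    exact h3 ▸ List.getElem_mem hk
  · intro hx
    rcases List.mem_iff_getElem.mp hx with ⟨k, hk, hkx⟩
    exact ⟨k, hk, Nat.zero_le _,
      by rw [List.getD_eq_getElem?_getD, List.getElem?_eq_getElem hk]; exact hkx⟩

lemma altB (d : Int) (arr : List Int) :
    beautifulTriplets_alt d arr
      = (((runsRec (PySem.List.sorted arr (fun x => x) false)).map Prod.fst).map
          (fun x => (arr.count x : Int)
            * ((arr.count (x + d) : Int) * (arr.count (x + d + d) : Int)))).sum := by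
  have hpw : (PySem.List.sorted arr (fun x => x) false).Pairwise (· ≤ ·) := by
    simpa using PySem.List.sorted_pairwise arr (fun x => x)
  have hScount : ∀ x : Int, (PySem.List.sorted arr (fun x => x) false).count x = arr.count x :=
    fun x => (PySem.List.sorted_perm arr (fun x => x) false).count_eq x
  obtain ⟨h1, h2, h3⟩ := runsRec_canon _ hpw
  have hg : runsRec (PySem.List.sorted arr (fun x => x) false)
      = ((runsRec (PySem.List.sorted arr (fun x => x) false)).map Prod.fst).map
          (fun v => (v, ((PySem.List.sorted arr (fun x => x) false).count v : Int))) :=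
    runs_shape _ _ h3
  unfold beautifulTriplets_alt
  simp only []
  conv_lhs => rw [runsFrom_eq, List.drop_zero, hg, PySem.List.foldl_add, List.map_map, zero_add]
  refine congrArg List.sum ?_
  apply List.map_congr_left
  intro v hv
  simp only [Function.comp]
  rw [List.length_map,
      lookup_canon _ _ h1 _ 0 _ (le_refl _), lookup_canon _ _ h1 _ 0 _ (le_refl _),
      if_congr (exists_getD_iff _ _) rfl rfl, if_congr (exists_getD_iff _ _) rfl rfl]
  have hmemc : ∀ x : Int,
      (if x ∈ (runsRec (PySem.List.sorted arr (fun x => x) false)).map Prod.fst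
        then ((PySem.List.sorted arr (fun x => x) false).count x : Int) else 0)
      = (arr.count x : Int) := by
    intro x
    by_cases hx : x ∈ (runsRec (PySem.List.sorted arr (fun x => x) false)).map Prod.fst
    · rw [if_pos hx, hScount x]
    · rw [if_neg hx]
      have : x ∉ arr := by
        intro hmem
        exact hx ((h2 x).mpr (((PySem.List.sorted_perm arr (fun x => x) false).mem_iff).mpr hmem))
      rw [List.count_eq_zero_of_not_mem this]
      simp
  rw [hmemc (v + d)]
  have h2d : v + 2 * d = v + d + d := by ring
  rw [h2d, hmemc (v + d + d), hScount v, mul_assoc]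

lemma permU (arr : List Int) :
    ((runsRec (PySem.List.sorted arr (fun x => x) false)).map Prod.fst).Perm
      (PySem.Set.ofList arr) := by
  have hpw : (PySem.List.sorted arr (fun x => x) false).Pairwise (· ≤ ·) := by
    simpa using PySem.List.sorted_pairwise arr (fun x => x)
  obtain ⟨h1, h2, _⟩ := runsRec_canon _ hpw
  refine (List.perm_ext_iff_of_nodup (h1.imp ne_of_lt) (PySem.Set.nodup_ofList arr)).mpr ?_
  intro a
  rw [h2 a, PySem.Set.mem_ofList, (PySem.List.sorted_perm arr (fun x => x) false).mem_iff]

-- ===== VERDICT (by name: the statement is the Claim_ definition above) =====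
theorem beautifulTriplets_spec : Claim_equal_beautifulTriplets := by
  intro d arr _
  unfold Spec_beautifulTriplets beautifulTriplets
  simp only []
  rw [PySem.List.foldl_pyRange_zero_pyGetD' arr 0
        (fun (st : PySem.Dict Int Int × List Int) x =>
          if !(st.1.contains x) then (st.1.insert x 1, st.2 ++ [x])
          else (st.1.modify x 0 (· + 1), st.2)) (PySem.Dict.empty, [])]
  rw [loopA arr PySem.Dict.empty [] (fun x => by simp)]
  rw [← PySem.Dict.counter_eq_foldl, ← PySem.Set.ofList_eq_foldl]
  rw [PySem.List.foldl_pyRange_zero_pyGetD' (PySem.Set.ofList arr) 0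
        (fun (res x : Int) =>
          if (PySem.Dict.counter arr).contains (x + d) && (PySem.Dict.counter arr).contains (x + d + d) then
            res + 1 * (PySem.Dict.counter arr).getD x 0 * (PySem.Dict.counter arr).getD (x + d) 0 *
              (PySem.Dict.counter arr).getD (x + d + d) 0
          else res) 0]
  have hfun : (fun (res x : Int) =>
        if (PySem.Dict.counter arr).contains (x + d) && (PySem.Dict.counter arr).contains (x + d + d) then
          res + 1 * (PySem.Dict.counter arr).getD x 0 * (PySem.Dict.counter arr).getD (x + d) 0 *
            (PySem.Dict.counter arr).getD (x + d + d) 0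
        else res)
      = fun (res x : Int) => res +
          (if arr.contains (x + d) && arr.contains (x + d + d) then
            (0 : Int) + 1 * (arr.count x : Int) * (arr.count (x + d) : Int) * (arr.count (x + d + d) : Int)
          else 0) := by
    funext r x
    simp only [PySem.Dict.contains_counter, PySem.Dict.getD_counter]
    split <;> ring
  rw [hfun, PySem.List.foldl_add]
  have h2 : ((PySem.Set.ofList arr).map (fun x =>
      if arr.contains (x + d) && arr.contains (x + d + d) then
        (0 : Int) + 1 * (arr.count x : Int) * (arr.count (x + d) : Int) * (arr.count (x + d + d) : Int)
      else 0))
      = (PySem.Set.ofList arr).map (fun x =>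
          (arr.count x : Int) * ((arr.count (x + d) : Int) * (arr.count (x + d + d) : Int))) := by
    apply List.map_congr_left
    intro x _
    exact term_eq arr d x
  rw [h2, altB, zero_add]
  exact (((permU arr).map _).sum_eq).symm
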